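-- pv_equiv track=rewrite | github.com/Yazeedosw/Python-Learning- | Python 102/python102_project.py | find_oldest_and_youngest
-- ===== SOURCE A (Python) =====
-- def find_oldest_and_youngest(people):
--     if len(people) == 0:
--         return "There are no people."
--     elif len(people) == 1:
--         return "There is no oldest or youngest person."
--
--     ages = [person[1] for person in people]
--     oldest_age = max(ages)
--     youngest_age = min(ages)
--
--     oldest_person = [person for person in people if person[1] == oldest_age][0]
--     youngest_person = [person for person in people if person[1] == youngest_age][0]
--
--     return f"The oldest one is {oldest_person[0]} and the youngest one is {youngest_person[0]}"
-- ===== SOURCE B (Python) =====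
-- def find_oldest_and_youngest(people):
--     if len(people) == 0:
--         return "There are no people."
--     if len(people) == 1:
--         return "There is no oldest or youngest person."
--     oldest = youngest = people[0]
--     for p in people[1:]:
--         if p[1] > oldest[1]:
--             oldest = p
--         if p[1] < youngest[1]:
--             youngest = p
--     return f"The oldest one is {oldest[0]} and the youngest one is {youngest[0]}"
-- ===== Notes on version B (the rewrite author's own statement) =====
-- stated objective: simpler
-- what changed: Replaces the ages-list build, max(), min() and two filtering rescans with a single linear pass that maintains the first-occurring oldest and youngest pair using strict comparisons.
import Mathlib
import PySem

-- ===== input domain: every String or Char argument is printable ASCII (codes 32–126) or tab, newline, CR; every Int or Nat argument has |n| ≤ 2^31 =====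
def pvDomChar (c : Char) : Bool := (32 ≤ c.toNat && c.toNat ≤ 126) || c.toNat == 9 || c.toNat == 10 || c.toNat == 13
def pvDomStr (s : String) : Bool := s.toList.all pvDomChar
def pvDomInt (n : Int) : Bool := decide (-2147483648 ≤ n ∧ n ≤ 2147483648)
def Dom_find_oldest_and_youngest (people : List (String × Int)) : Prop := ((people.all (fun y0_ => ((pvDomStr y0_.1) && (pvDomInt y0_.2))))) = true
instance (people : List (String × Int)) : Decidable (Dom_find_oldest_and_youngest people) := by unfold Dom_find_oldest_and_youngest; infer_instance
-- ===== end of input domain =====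

-- B replaces A's ages-list + max/min + two filtering rescans with one linear pass
-- maintaining both extremes (strict comparisons keep A's first-occurrence choice); single pass instead of five.
-- ===== PORT A =====
def find_oldest_and_youngest (people : List (String × Int)) : String :=
  if people.length == 0 then "There are no people."
  else if people.length == 1 then "There is no oldest or youngest person."
  else
    let ages := people.map (fun person => person.2)
    let oldest_age := (PySem.List.max? ages (fun y => y)).getD 0
    let youngest_age := (PySem.List.min? ages (fun y => y)).getD 0
    let oldest_person := ((people.filter (fun person => person.2 == oldest_age)).head?).getD ("", 0)
    let youngest_person := ((people.filter (fun person => person.2 == youngest_age)).head?).getD ("", 0)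
    "The oldest one is " ++ oldest_person.1 ++ " and the youngest one is " ++ youngest_person.1

-- ===== PORT B =====
def find_oldest_and_youngest_alt (people : List (String × Int)) : String :=
  match people with
  | [] => "There are no people."
  | [_] => "There is no oldest or youngest person."
  | h :: t =>
    let st := t.foldl
      (fun (st : (String × Int) × (String × Int)) p =>
        (if p.2 > st.1.2 then p else st.1, if p.2 < st.2.2 then p else st.2)) (h, h)
    "The oldest one is " ++ st.1.1 ++ " and the youngest one is " ++ st.2.1

-- ===== PRECONDITION & SPEC =====
def Spec_find_oldest_and_youngest (people : List (String × Int)) (out : String) : Prop := out = find_oldest_and_youngest_alt people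
instance (people : List (String × Int)) (out : String) : Decidable (Spec_find_oldest_and_youngest people out) := by unfold Spec_find_oldest_and_youngest; infer_instance

-- ===== CLAIM (what is proved, stated in full; the proofs are below) =====
def Claim_equal_find_oldest_and_youngest : Prop := ∀ (people : List (String × Int)), Dom_find_oldest_and_youngest people → Spec_find_oldest_and_youngest people (find_oldest_and_youngest people)

-- ===== LEMMAS AND PROOFS =====

-- the paired fold of B splits into two independent folds
theorem pv_fold_pair (t : List (String × Int)) (o y : String × Int) :
    t.foldl (fun (st : (String × Int) × (String × Int)) p =>
        (if p.2 > st.1.2 then p else st.1, if p.2 < st.2.2 then p else st.2)) (o, y)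
      = (t.foldl (fun a p => if p.2 > a.2 then p else a) o,
         t.foldl (fun a p => if p.2 < a.2 then p else a) y) := by
  induction t generalizing o y with
  | nil => rfl
  | cons a t ih => simp [List.foldl_cons, ih]

-- the running-max fold returns the first element realizing the max of the snd-projections
theorem pv_first_max (t : List (String × Int)) (h : String × Int) :
    ((h :: t).filter (fun p => p.2 == (t.map Prod.snd).foldl max h.2)).head?
      = some (t.foldl (fun a p => if p.2 > a.2 then p else a) h) := by
  induction t generalizing h with
  | nil => simp
  | cons a t ih =>
    have hM := (PySem.List.le_foldl_max (t.map Prod.snd) (max h.2 a.2)).1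
    simp only [List.map_cons, List.foldl_cons]
    by_cases hgt : a.2 > h.2
    · rw [show max h.2 a.2 = a.2 from max_eq_right hgt.le] at hM ⊢
      have ihA := ih a
      generalize hF : (t.map Prod.snd).foldl max a.2 = F at ihA hM ⊢
      have hh : (h.2 == F) = false := by simp only [beq_eq_false_iff_ne, ne_eq]; omega
      rw [if_pos hgt]
      simpa [List.filter_cons, hh] using ihA
    · rw [show max h.2 a.2 = h.2 from max_eq_left (by omega)] at hM ⊢
      have ihH := ih h
      generalize hF : (t.map Prod.snd).foldl max h.2 = F at ihH hM ⊢
      rw [if_neg hgt]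
      by_cases heq : h.2 = F
      · have hh : (h.2 == F) = true := by simp [heq]
        simpa [List.filter_cons, hh] using ihH
      · have hh : (h.2 == F) = false := by simp only [beq_eq_false_iff_ne, ne_eq]; omega
        have ha : (a.2 == F) = false := by simp only [beq_eq_false_iff_ne, ne_eq]; omega
        simp only [List.filter_cons, hh, ha] at ihH ⊢
        simpa using ihH

-- dual: the running-min fold returns the first element realizing the min
theorem pv_first_min (t : List (String × Int)) (h : String × Int) :
    ((h :: t).filter (fun p => p.2 == (t.map Prod.snd).foldl min h.2)).head?
      = some (t.foldl (fun a p => if p.2 < a.2 then p else a) h) := by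
  induction t generalizing h with
  | nil => simp
  | cons a t ih =>
    have hM := (PySem.List.foldl_min_le (t.map Prod.snd) (min h.2 a.2)).1
    simp only [List.map_cons, List.foldl_cons]
    by_cases hlt : a.2 < h.2
    · rw [show min h.2 a.2 = a.2 from min_eq_right hlt.le] at hM ⊢
      have ihA := ih a
      generalize hF : (t.map Prod.snd).foldl min a.2 = F at ihA hM ⊢
      have hh : (h.2 == F) = false := by simp only [beq_eq_false_iff_ne, ne_eq]; omega
      rw [if_pos hlt]
      simpa [List.filter_cons, hh] using ihA
    · rw [show min h.2 a.2 = h.2 from min_eq_left (by omega)] at hM ⊢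
      have ihH := ih h
      generalize hF : (t.map Prod.snd).foldl min h.2 = F at ihH hM ⊢
      rw [if_neg hlt]
      by_cases heq : h.2 = F
      · have hh : (h.2 == F) = true := by simp [heq]
        simpa [List.filter_cons, hh] using ihH
      · have hh : (h.2 == F) = false := by simp only [beq_eq_false_iff_ne, ne_eq]; omega
        have ha : (a.2 == F) = false := by simp only [beq_eq_false_iff_ne, ne_eq]; omega
        simp only [List.filter_cons, hh, ha] at ihH ⊢
        simpa using ihH

-- ===== VERDICT (by name: the statement is the Claim_ definition above) =====
theorem find_oldest_and_youngest_spec : Claim_equal_find_oldest_and_youngest := by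
  intro people _
  unfold Spec_find_oldest_and_youngest find_oldest_and_youngest find_oldest_and_youngest_alt
  match people with
  | [] => rfl
  | [_] => rfl
  | h :: a :: t =>
    simp only [List.length_cons, pv_fold_pair]
    rw [show ((h :: a :: t).map (fun p => p.2)) = h.2 :: ((a :: t).map Prod.snd) from rfl]
    rw [PySem.List.max?_id_cons, PySem.List.min?_id_cons]
    simp only [Option.getD_some]
    rw [pv_first_max (a :: t) h, pv_first_min (a :: t) h]
    simp
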